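-- pv_equiv track=rewrite | github.com/r-1317/AtCoder | 2025/AHC049/a04.py | move_to
-- ===== SOURCE A (Python) =====
-- from typing import Tuple, List
--
-- def step_to(takahashi: List[int], target: Tuple[int, int]) -> Tuple[str, List[int]]:
--   if takahashi[0] < target[0]:  # 下に移動
--     takahashi[0] += 1
--     return "D", takahashi
--   elif takahashi[0] > target[0]:  # 上に移動
--     takahashi[0] -= 1
--     return "U", takahashi
--   elif takahashi[1] < target[1]:  # 右に移動
--     takahashi[1] += 1
--     return "R", takahashi
--   elif takahashi[1] > target[1]:  # 左に移動
--     takahashi[1] -= 1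
--     return "L", takahashi
--   else:  # 到達済み
--     return "", takahashi
--
-- def move_to(takahashi: List[int], target: Tuple[int, int], carrying_list: List[List[int]]) -> Tuple[List[str], List[int], List[List[int]]]:
--   ans = []
--   # 目標位置に到達するまでループ
--   while takahashi[0] != target[0] or takahashi[1] != target[1]:
--     step, takahashi = step_to(takahashi, target)
--     ans.append(step)  # 動きを追加
--   # 持っているダンボール箱の耐久値を更新
--   tmp_wheight = 0
--   for i in range(len(carrying_list)-1, -1, -1):
--     carrying_list[i][1] -= tmp_wheight * len(ans)  # 耐久値を更新
--     tmp_wheight += carrying_list[i][0]  # 重さを加算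
--   return ans, takahashi, carrying_list  # 動きと現在位置と持っているダンボール箱のリストを返す
-- ===== SOURCE B (Python) =====
-- def move_to(takahashi, target, carrying_list):
--     dx = target[0] - takahashi[0]
--     dy = target[1] - takahashi[1]
--     ans = ['D' if dx > 0 else 'U'] * abs(dx) + ['R' if dy > 0 else 'L'] * abs(dy)
--     takahashi[0], takahashi[1] = target
--     n = len(ans)
--     below = sum(row[0] for row in carrying_list)
--     for row in carrying_list:
--         below -= row[0]
--         row[1] -= below * n
--     return ans, takahashi, carrying_list
-- ===== Notes on version B (the rewrite author's own statement) =====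
-- stated objective: faster
-- what changed: Replaces the unit-step while loop (one list mutation and append per cell) with a closed-form move list built from the signed coordinate differences, and replaces the reverse-index durability loop carrying a running weight with a single forward pass over a precomputed total weight.
import Mathlib
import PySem

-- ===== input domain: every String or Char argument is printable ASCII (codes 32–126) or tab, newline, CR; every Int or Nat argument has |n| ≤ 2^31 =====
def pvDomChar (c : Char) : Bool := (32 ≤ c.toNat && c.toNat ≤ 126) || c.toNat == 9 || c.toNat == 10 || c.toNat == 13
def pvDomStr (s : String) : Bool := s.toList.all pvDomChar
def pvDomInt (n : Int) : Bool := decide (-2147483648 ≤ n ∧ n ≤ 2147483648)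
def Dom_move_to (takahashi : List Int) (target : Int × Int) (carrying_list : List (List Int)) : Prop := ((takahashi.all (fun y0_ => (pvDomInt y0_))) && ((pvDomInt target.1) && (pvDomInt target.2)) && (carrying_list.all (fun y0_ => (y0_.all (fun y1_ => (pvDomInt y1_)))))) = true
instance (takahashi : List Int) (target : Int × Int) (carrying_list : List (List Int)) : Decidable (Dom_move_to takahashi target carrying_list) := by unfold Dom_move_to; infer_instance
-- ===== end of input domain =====

-- B builds the move list in closed form from the coordinate differences and updates durabilities
-- in one forward pass over a precomputed total weight (objective: faster by a constant factor).
-- Note: the Python A mutates takahashi and carrying_list in place and B performs the same mutations;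
-- the equivalence proved here is about the returned value.

-- ===== PORT A =====
def step_to (t : List Int) (target : Int × Int) : String × List Int :=
  if PySem.List.pyGetD t 0 0 < target.1 then
    ("D", PySem.List.pySetD t 0 (PySem.List.pyGetD t 0 0 + 1))
  else if PySem.List.pyGetD t 0 0 > target.1 then
    ("U", PySem.List.pySetD t 0 (PySem.List.pyGetD t 0 0 - 1))
  else if PySem.List.pyGetD t 1 0 < target.2 then
    ("R", PySem.List.pySetD t 1 (PySem.List.pyGetD t 1 0 + 1))
  else if PySem.List.pyGetD t 1 0 > target.2 then
    ("L", PySem.List.pySetD t 1 (PySem.List.pyGetD t 1 0 - 1))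
  else ("", t)

-- the while loop, with fuel = the exact number of iterations (supplied by move_to below)
def moveWhile (fuel : Nat) (t : List Int) (target : Int × Int) (ans : List String) :
    List String × List Int :=
  match fuel with
  | 0 => (ans, t)
  | Nat.succ f =>
    if PySem.List.pyGetD t 0 0 ≠ target.1 ∨ PySem.List.pyGetD t 1 0 ≠ target.2 then
      let r := step_to t target
      moveWhile f r.2 target (ans ++ [r.1])
    else (ans, t)

-- the reverse-index durability loop: processes the last row first, returns (tmp_wheight, updated list)
def updA (clist : List (List Int)) (n : Int) : Int × List (List Int) :=
  match clist with
  | [] => (0, [])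
  | row :: rest =>
    let r := updA rest n
    (r.1 + PySem.List.pyGetD row 0 0,
     PySem.List.pySetD row 1 (PySem.List.pyGetD row 1 0 - r.1 * n) :: r.2)

def move_to (takahashi : List Int) (target : Int × Int) (carrying_list : List (List Int)) : List String × List Int × List (List Int) :=
  let fuel := (target.1 - PySem.List.pyGetD takahashi 0 0).natAbs +
              (target.2 - PySem.List.pyGetD takahashi 1 0).natAbs
  let r := moveWhile fuel takahashi target []
  (r.1, r.2, (updA carrying_list (PySem.List.len r.1)).2)

-- ===== PORT B =====
def sumW (clist : List (List Int)) : Int :=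
  (clist.map (fun row => PySem.List.pyGetD row 0 0)).sum

def updB (clist : List (List Int)) (below n : Int) : List (List Int) :=
  match clist with
  | [] => []
  | row :: rest =>
    let below' := below - PySem.List.pyGetD row 0 0
    PySem.List.pySetD row 1 (PySem.List.pyGetD row 1 0 - below' * n) :: updB rest below' n

def move_to_alt (takahashi : List Int) (target : Int × Int) (carrying_list : List (List Int)) : List String × List Int × List (List Int) :=
  let dx := target.1 - PySem.List.pyGetD takahashi 0 0
  let dy := target.2 - PySem.List.pyGetD takahashi 1 0
  let ans := List.replicate dx.natAbs (if 0 < dx then "D" else "U") ++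
             List.replicate dy.natAbs (if 0 < dy then "R" else "L")
  let t' := PySem.List.pySetD (PySem.List.pySetD takahashi 0 target.1) 1 target.2
  (ans, t', updB carrying_list (sumW carrying_list) (PySem.List.len ans))

-- ===== PRECONDITION & SPEC =====
-- Pre_ excludes exactly the inputs on which the Python A raises IndexError:
-- takahashi shorter than 2 (takahashi[1] is read), or a carried row shorter than 2 (row[0]/row[1] are read).
def Pre_move_to (takahashi : List Int) (target : Int × Int) (carrying_list : List (List Int)) : Prop :=
  2 ≤ takahashi.length ∧ ∀ row ∈ carrying_list, 2 ≤ row.length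
instance (takahashi : List Int) (target : Int × Int) (carrying_list : List (List Int)) : Decidable (Pre_move_to takahashi target carrying_list) := by unfold Pre_move_to; infer_instance
def pvWitness_move_to : List Int × (Int × Int) × List (List Int) := ([0, 0], (2, -1), [[3, 10], [1, 5]])

def Spec_move_to (takahashi : List Int) (target : Int × Int) (carrying_list : List (List Int)) (out : List String × List Int × List (List Int)) : Prop := out = move_to_alt takahashi target carrying_list
instance (takahashi : List Int) (target : Int × Int) (carrying_list : List (List Int)) (out : List String × List Int × List (List Int)) : Decidable (Spec_move_to takahashi target carrying_list out) := by unfold Spec_move_to; infer_instance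

-- ===== CLAIM (what is proved, stated in full; the proofs are below) =====
def Claim_equal_move_to : Prop := ∀ (takahashi : List Int) (target : Int × Int) (carrying_list : List (List Int)), Dom_move_to takahashi target carrying_list → Pre_move_to takahashi target carrying_list → Spec_move_to takahashi target carrying_list (move_to takahashi target carrying_list)

-- ===== LEMMAS AND PROOFS =====

theorem getD0_cons (x y : Int) (rest : List Int) :
    PySem.List.pyGetD (x :: y :: rest) 0 0 = x := by
  simp [pysem]

theorem getD1_cons (x y : Int) (rest : List Int) :
    PySem.List.pyGetD (x :: y :: rest) 1 0 = y := by
  simp [PySem.List.pyGetD, PySem.List.pyGet?, PySem.List.pyIdx?]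

theorem setD0_cons (x y v : Int) (rest : List Int) :
    PySem.List.pySetD (x :: y :: rest) 0 v = v :: y :: rest := by
  rw [PySem.List.pySetD_of_nonneg (x :: y :: rest) v (by norm_num : (0:Int) ≤ 0)]
  rfl

theorem setD1_cons (x y v : Int) (rest : List Int) :
    PySem.List.pySetD (x :: y :: rest) 1 v = x :: v :: rest := by
  rw [PySem.List.pySetD_of_nonneg (x :: y :: rest) v (by norm_num : (0:Int) ≤ 1)]
  rfl

-- A's reverse durability pass equals (total weight, B's forward pass started from the total weight).
theorem updA_eq_updB (clist : List (List Int)) (n : Int) :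
    updA clist n = (sumW clist, updB clist (sumW clist) n) := by
  induction clist with
  | nil => simp [updA, updB, sumW]
  | cons row rest ih =>
    have h : sumW (row :: rest) - PySem.List.pyGetD row 0 0 = sumW rest := by
      simp [sumW]
    have hs : sumW rest + PySem.List.pyGetD row 0 0 = sumW (row :: rest) := by
      simp [sumW]; ring
    simp only [updA, updB, ih, h, hs]

-- A's while loop, on a list of length ≥ 2 and with fuel = the exact distance, produces
-- the closed-form move list and the target coordinates.
theorem loopSpec (tx ty : Int) :
    ∀ (f : Nat) (x y : Int) (rest : List Int) (ans : List String),
      f = (tx - x).natAbs + (ty - y).natAbs →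
      moveWhile f (x :: y :: rest) (tx, ty) ans =
        (ans ++ (List.replicate (tx - x).natAbs (if 0 < tx - x then "D" else "U") ++
                 List.replicate (ty - y).natAbs (if 0 < ty - y then "R" else "L")),
         tx :: ty :: rest) := by
  intro f
  induction f with
  | zero =>
    intro x y rest ans hf
    have hx : tx = x := by omega
    have hy : ty = y := by omega
    subst hx; subst hy
    simp [moveWhile]
  | succ f ih =>
    intro x y rest ans hf
    rcases lt_trichotomy x tx with hx | hx | hx
    · -- move down
      have hstep : step_to (x :: y :: rest) (tx, ty) = ("D", (x + 1) :: y :: rest) := by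
        simp [step_to, setD0_cons, hx]
      have hcond : PySem.List.pyGetD (x :: y :: rest) 0 0 ≠ (tx, ty).1 ∨
          PySem.List.pyGetD (x :: y :: rest) 1 0 ≠ (tx, ty).2 := by
        left; rw [getD0_cons]; exact ne_of_lt hx
      rw [moveWhile, if_pos hcond, hstep]
      rw [ih (x + 1) y rest (ans ++ ["D"]) (by omega)]
      have hk : (tx - x).natAbs = (tx - (x + 1)).natAbs + 1 := by omega
      have hd : 0 < tx - x := by omega
      rw [hk, List.replicate_succ, if_pos hd]
      by_cases h1 : 0 < tx - (x + 1)
      · rw [if_pos h1]; simp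
      · have h0 : (tx - (x + 1)).natAbs = 0 := by omega
        simp [h0]
    · -- first coordinate reached
      have hdx : (tx - x).natAbs = 0 := by omega
      have hx1 : ¬ PySem.List.pyGetD (x :: y :: rest) 0 0 < tx := by rw [getD0_cons]; omega
      have hx2 : ¬ tx < PySem.List.pyGetD (x :: y :: rest) 0 0 := by rw [getD0_cons]; omega
      rcases lt_trichotomy y ty with hy | hy | hy
      · -- move right
        have hstep : step_to (x :: y :: rest) (tx, ty) = ("R", x :: (y + 1) :: rest) := by
          simp [step_to, hx, getD1_cons, setD1_cons, hy]
        have hcond : PySem.List.pyGetD (x :: y :: rest) 0 0 ≠ (tx, ty).1 ∨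
            PySem.List.pyGetD (x :: y :: rest) 1 0 ≠ (tx, ty).2 := by
          right; rw [getD1_cons]; exact ne_of_lt hy
        rw [moveWhile, if_pos hcond, hstep]
        rw [ih x (y + 1) rest (ans ++ ["R"]) (by omega)]
        have hk : (ty - y).natAbs = (ty - (y + 1)).natAbs + 1 := by omega
        have hd : 0 < ty - y := by omega
        rw [hdx, hk, List.replicate_succ, if_pos hd]
        by_cases h1 : 0 < ty - (y + 1)
        · rw [if_pos h1]; simp
        · have h0 : (ty - (y + 1)).natAbs = 0 := by omega
          simp [h0]
      · omega
      · -- move left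
        have hstep : step_to (x :: y :: rest) (tx, ty) = ("L", x :: (y - 1) :: rest) := by
          simp [step_to, hx, getD1_cons, setD1_cons, not_lt_of_gt hy, hy]
        have hcond : PySem.List.pyGetD (x :: y :: rest) 0 0 ≠ (tx, ty).1 ∨
            PySem.List.pyGetD (x :: y :: rest) 1 0 ≠ (tx, ty).2 := by
          right; rw [getD1_cons]; exact ne_of_gt hy
        rw [moveWhile, if_pos hcond, hstep]
        rw [ih x (y - 1) rest (ans ++ ["L"]) (by omega)]
        have hk : (ty - y).natAbs = (ty - (y - 1)).natAbs + 1 := by omega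
        have hd : ¬ 0 < ty - y := by omega
        rw [hdx, hk, List.replicate_succ, if_neg hd]
        by_cases h1 : 0 < ty - (y - 1)
        · omega
        · rw [if_neg h1]; simp
    · -- move up
      have hstep : step_to (x :: y :: rest) (tx, ty) = ("U", (x - 1) :: y :: rest) := by
        simp [step_to, setD0_cons, not_lt_of_gt hx, hx]
      have hcond : PySem.List.pyGetD (x :: y :: rest) 0 0 ≠ (tx, ty).1 ∨
          PySem.List.pyGetD (x :: y :: rest) 1 0 ≠ (tx, ty).2 := by
        left; rw [getD0_cons]; exact ne_of_gt hx
      rw [moveWhile, if_pos hcond, hstep]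
      rw [ih (x - 1) y rest (ans ++ ["U"]) (by omega)]
      have hk : (tx - x).natAbs = (tx - (x - 1)).natAbs + 1 := by omega
      have hd : ¬ 0 < tx - x := by omega
      rw [hk, List.replicate_succ, if_neg hd]
      by_cases h1 : 0 < tx - (x - 1)
      · omega
      · rw [if_neg h1]; simp

-- ===== VERDICT (by name: the statement is the Claim_ definition above) =====
theorem move_to_spec : Claim_equal_move_to := by
  intro t tg cl _ hpre
  obtain ⟨tx, ty⟩ := tg
  obtain ⟨hlen, _⟩ := hpre
  match t, hlen with
  | x :: y :: rest, _ =>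
    unfold Spec_move_to
    simp only [move_to, move_to_alt, getD0_cons, getD1_cons, setD0_cons, setD1_cons]
    rw [loopSpec tx ty _ x y rest [] rfl]
    simp only [List.nil_append, updA_eq_updB]
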